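-- pv_equiv track=rewrite | github.com/Ilan-Goren/ASEProject | pyramid/solver_functions/piece.py | build_transformations
-- ===== SOURCE A (Python) =====
-- def build_transformations(cells):
--     """
--     Generates all unique transformations (rotations, reflections, leans) of a piece.
--
--     :param cells: The initial list of cell coordinates for the piece.
--     :type cells: list[tuple[int, int, int]]
--     :return: A list of unique transformations.
--     :rtype: list[list[tuple[int, int, int]]]
--     """
--     transformations = []
--     initial = [cells]
--     initial += rotate_z(normalize_transformation(cells))
--
--     for next_cells in initial:
--         next_cells = sorted(normalize_transformation(next_cells))
--
--         while next_cells not in transformations: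
--             while next_cells not in transformations:
--                 transformations.append(next_cells)
--                 #apply rotatexy, normalize, and sort
--                 next_cells = sorted(normalize_transformation([(rotate_xy(cell)) for cell in next_cells]))
--
--             #apply reflection, normalize, and sort
--             next_cells = sorted(normalize_transformation([reflect(cell) for cell in next_cells]))
--
--     #remove duplicates (if any) and return unique transformations
--     unique_symmetries = [list(x) for x in set(tuple(s) for s in transformations)]
--     return unique_symmetries
--
-- def rotate_z(cells):
--     """
--     Rotates a cell around the z-plane for upright piece placements.
--
--     :param cell: The cell coordinates to rotate.
--     :type cell: tuple[int, int, int]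
--     :return: Rotated cell coordinates.
--     :rtype: tuple[int, int, int]
--     """
--     transformations = [[(int((c[0] - c[1]) / 2), int((c[0] - c[1]) / 2), int((c[0] + c[1]) / 2)) for c in cells],
--                        [(int((c[0] - c[1]) / 2), int((c[0] - c[1]) / 2), int((-c[0] - c[1]) / 2)) for c in cells],
--                        [(int((c[0] + c[1]) / 2), int((c[0] + c[1]) / 2), int((-c[0] + c[1]) / 2)) for c in cells],
--                        [(int((c[0] + c[1]) / 2), int((c[0] + c[1]) / 2), int((c[0] - c[1]) / 2)) for c in cells]]
--     return transformations
--
-- def rotate_xy(cell):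
--     """
--     Rotates a cell around the xy-plane.
--
--     :param cell: The cell coordinates to rotate.
--     :type cell: tuple[int, int, int]
--     :return: Rotated cell coordinates.
--     :rtype: tuple[int, int, int]
--     """
--     vec = list(cell)
--     vec[0], vec[1] = vec[1], -vec[0]
--     return tuple(vec)
--
-- def reflect(cell):
--     """
--     Reflects a cell across the xy-plane.
--
--     :param cell: The cell coordinates to reflect.
--     :type cell: tuple[int, int, int]
--     :return: Reflected cell coordinates.
--     :rtype: tuple[int, int, int]
--     """
--     vec = list(cell)
--     vec[0] = -vec[0]
--     return tuple(vec)
--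
-- def normalize_transformation(cells):
--     """
--     Normalizes a set of cell coordinates to their minimum values.
--
--     :param cells: A list of cell coordinates.
--     :type cells: list[tuple[int, int, int]]
--     :return: Normalized cell coordinates.
--     :rtype: list[tuple[int, int, int]]
--     """
--     # Find minimum values in each dimension
--     min_x = min(cell[0] for cell in cells)
--     min_y = min(cell[1] for cell in cells)
--     min_z = min(cell[2] for cell in cells)
--
--     # Shift each coordinate by the minimum values
--     normalized_cells = [(cell[0] - min_x, cell[1] - min_y, cell[2] - min_z) for cell in cells]
--     return normalized_cells
-- ===== SOURCE B (Python) =====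
-- def build_transformations(cells):
--     """Same unique symmetries as the original, by straight-line enumeration:
--     per seed, the dihedral orbit is exactly the 8 candidates r^k(c) and
--     r^k(reflect(c)) for k < 4 (r = rotate+canonicalize has order 4), so one
--     dedup fold replaces the nested membership-driven while-loops and the
--     final set() pass."""
--     seeds = [cells] + rotate_z(normalize_transformation(cells))
--     result = []
--     for seed in seeds:
--         c = canonical(seed)
--         for start in (c, canonical([reflect(cell) for cell in c])):
--             x = start
--             for _ in range(4):
--                 if x not in result:
--                     result.append(x)
--                 x = canonical([rotate_xy(cell) for cell in x])
--     return result
--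
--
-- def canonical(cells):
--     return sorted(normalize_transformation(cells))
--
--
-- def rotate_z(cells):
--     transformations = [[(int((c[0] - c[1]) / 2), int((c[0] - c[1]) / 2), int((c[0] + c[1]) / 2)) for c in cells],
--                        [(int((c[0] - c[1]) / 2), int((c[0] - c[1]) / 2), int((-c[0] - c[1]) / 2)) for c in cells],
--                        [(int((c[0] + c[1]) / 2), int((c[0] + c[1]) / 2), int((-c[0] + c[1]) / 2)) for c in cells],
--                        [(int((c[0] + c[1]) / 2), int((c[0] + c[1]) / 2), int((c[0] - c[1]) / 2)) for c in cells]]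
--     return transformations
--
--
-- def rotate_xy(cell):
--     return (cell[1], -cell[0], cell[2])
--
--
-- def reflect(cell):
--     return (-cell[0], cell[1], cell[2])
--
--
-- def normalize_transformation(cells):
--     min_x = min(cell[0] for cell in cells)
--     min_y = min(cell[1] for cell in cells)
--     min_z = min(cell[2] for cell in cells)
--     return [(cell[0] - min_x, cell[1] - min_y, cell[2] - min_z) for cell in cells]
-- ===== Notes on version B (the rewrite author's own statement) =====
-- stated objective: simpler
-- what changed: Replaces A's nested membership-driven while-loops (rotate until a repeat, then reflect, repeat) and its final set() dedup pass by a straight-line enumeration: per seed it generates the fixed eight candidates r^k(c) and r^k(reflect(c)), k<4, of the dihedral orbit and dedups them in one fold, relying on r having order 4 on canonical pieces.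
-- outside the precondition, e.g. on build_transformations([]): A raises ValueError, B raises ValueError
import Mathlib
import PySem

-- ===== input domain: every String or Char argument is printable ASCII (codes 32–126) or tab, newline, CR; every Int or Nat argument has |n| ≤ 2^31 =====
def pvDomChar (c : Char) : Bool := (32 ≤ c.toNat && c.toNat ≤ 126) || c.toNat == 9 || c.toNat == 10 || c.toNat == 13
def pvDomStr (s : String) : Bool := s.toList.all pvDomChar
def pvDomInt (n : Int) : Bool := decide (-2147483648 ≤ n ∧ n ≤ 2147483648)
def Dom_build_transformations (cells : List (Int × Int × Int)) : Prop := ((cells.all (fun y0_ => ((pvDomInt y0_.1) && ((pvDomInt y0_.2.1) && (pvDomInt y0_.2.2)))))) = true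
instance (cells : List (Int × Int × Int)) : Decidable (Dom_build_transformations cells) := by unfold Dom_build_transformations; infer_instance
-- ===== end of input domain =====

-- B replaces A's nested membership-driven while-loops and final set() pass by a
-- straight-line dedup fold over the fixed eight orbit candidates per seed (objective: simpler).

-- ===== PORT A =====

-- rotate_xy(cell)
def pvRotXY (c : Int × Int × Int) : Int × Int × Int := (c.2.1, -c.1, c.2.2)

-- reflect(cell)
def pvReflect (c : Int × Int × Int) : Int × Int × Int := (-c.1, c.2.1, c.2.2)

-- min(...) over a generator; Python raises ValueError on an empty sequence
-- (excluded by Pre_), so the default 0 is never observed.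
def pvMinD (xs : List Int) : Int := (PySem.List.min? xs (fun x => x)).getD 0

-- normalize_transformation(cells)
def pvNormalize (cells : List (Int × Int × Int)) : List (Int × Int × Int) :=
  let mx := pvMinD (cells.map (fun c => c.1))
  let my := pvMinD (cells.map (fun c => c.2.1))
  let mz := pvMinD (cells.map (fun c => c.2.2))
  cells.map (fun c => (c.1 - mx, c.2.1 - my, c.2.2 - mz))

-- Python's '<' on int-triples: true lexicographic comparison
def pvLexLt (a b : Int × Int × Int) : Bool :=
  decide (a.1 < b.1) || (decide (a.1 = b.1) &&
    (decide (a.2.1 < b.2.1) || (decide (a.2.1 = b.2.1) && decide (a.2.2 < b.2.2))))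

-- sorted(list_of_triples): stable insertion sort by the genuine lexicographic
-- order — the same algorithm PySem.List.sorted uses (sorted_eq_foldl_insertBy);
-- exact, since Mathlib's '<' on products is not Python's tuple order.
def pvSort (xs : List (Int × Int × Int)) : List (Int × Int × Int) :=
  xs.foldl (fun acc x => PySem.List.insertBy pvLexLt x acc) []

-- sorted(normalize_transformation(xs)) — the canonical form both loops maintain
def pvCanon (xs : List (Int × Int × Int)) : List (Int × Int × Int) := pvSort (pvNormalize xs)

-- rotate_z(cells); int(x/2) with x = c0±c1: float division then truncation
-- toward zero = Int.tdiv, exact for the |n| ≤ 2^31 coordinates of Dom_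
def pvRotZ (cells : List (Int × Int × Int)) : List (List (Int × Int × Int)) :=
  [cells.map (fun c => (Int.tdiv (c.1 - c.2.1) 2, Int.tdiv (c.1 - c.2.1) 2, Int.tdiv (c.1 + c.2.1) 2)),
   cells.map (fun c => (Int.tdiv (c.1 - c.2.1) 2, Int.tdiv (c.1 - c.2.1) 2, Int.tdiv (-c.1 - c.2.1) 2)),
   cells.map (fun c => (Int.tdiv (c.1 + c.2.1) 2, Int.tdiv (c.1 + c.2.1) 2, Int.tdiv (-c.1 + c.2.1) 2)),
   cells.map (fun c => (Int.tdiv (c.1 + c.2.1) 2, Int.tdiv (c.1 + c.2.1) 2, Int.tdiv (c.1 - c.2.1) 2))]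

-- sorted(normalize_transformation([rotate_xy(cell) for cell in xs]))
def pvStepRot (xs : List (Int × Int × Int)) : List (Int × Int × Int) := pvCanon (xs.map pvRotXY)

-- sorted(normalize_transformation([reflect(cell) for cell in xs]))
def pvStepRef (xs : List (Int × Int × Int)) : List (Int × Int × Int) := pvCanon (xs.map pvReflect)

-- the inner 'while next_cells not in transformations' loop (fuel-guarded; the
-- loop provably stops after at most 4 appends, so fuel 100 is never exhausted)
def pvChain : Nat → List (List (Int × Int × Int)) → List (Int × Int × Int) →
    List (List (Int × Int × Int)) × List (Int × Int × Int)
  | 0, T, x => (T, x)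
  | f + 1, T, x => if x ∈ T then (T, x) else pvChain f (T ++ [x]) (pvStepRot x)

-- the outer 'while next_cells not in transformations' loop
def pvSeedLoop : Nat → List (List (Int × Int × Int)) → List (Int × Int × Int) →
    List (List (Int × Int × Int))
  | 0, T, _ => T
  | f + 1, T, x =>
    if x ∈ T then T
    else
      let p := pvChain (f + 1) T x
      pvSeedLoop f p.1 (pvStepRef p.2)

def build_transformations (cells : List (Int × Int × Int)) : List (List (Int × Int × Int)) :=
  let initial := cells :: pvRotZ (pvNormalize cells)
  let transformations := initial.foldl (fun T nc => pvSeedLoop 100 T (pvCanon nc)) []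
  -- [list(x) for x in set(tuple(s) for s in transformations)]
  PySem.Set.ofList transformations

-- ===== PORT B =====

-- 'if x not in result: result.append(x)'
def pvAdd2 (res : List (List (Int × Int × Int))) (x : List (Int × Int × Int)) :
    List (List (Int × Int × Int)) :=
  if x ∈ res then res else res ++ [x]

-- 'x = start; for _ in range(4): add x; x = canonical(rotated x)'
def pvOrbit4 (res : List (List (Int × Int × Int))) (start : List (Int × Int × Int)) :
    List (List (Int × Int × Int)) :=
  ((List.range 4).foldl (fun st _ => (pvAdd2 st.1 st.2, pvStepRot st.2)) (res, start)).1

-- one seed of Source B: both starts c and canonical(reflect(c))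
def pvSeedB (res : List (List (Int × Int × Int))) (c : List (Int × Int × Int)) :
    List (List (Int × Int × Int)) :=
  [c, pvStepRef c].foldl pvOrbit4 res

def build_transformations_alt (cells : List (Int × Int × Int)) : List (List (Int × Int × Int)) :=
  let seeds := cells :: pvRotZ (pvNormalize cells)
  seeds.foldl (fun result seed => pvSeedB result (pvCanon seed)) []

-- ===== PRECONDITION & SPEC =====

-- Python A raises ValueError (min() of an empty sequence) on [], and so does B.
def Pre_build_transformations (cells : List (Int × Int × Int)) : Prop := cells ≠ []
instance (cells : List (Int × Int × Int)) : Decidable (Pre_build_transformations cells) := by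
  unfold Pre_build_transformations; infer_instance

def pvWitness_build_transformations : (List (Int × Int × Int)) := [(0, 0, 0), (1, 0, 0)]

def Spec_build_transformations (cells : List (Int × Int × Int)) (out : List (List (Int × Int × Int))) : Prop := out = build_transformations_alt cells
instance (cells : List (Int × Int × Int)) (out : List (List (Int × Int × Int))) : Decidable (Spec_build_transformations cells out) := by unfold Spec_build_transformations; infer_instance

-- ===== CLAIM (what is proved, stated in full; the proofs are below) =====
def Claim_equal_build_transformations : Prop := ∀ (cells : List (Int × Int × Int)), Dom_build_transformations cells → Pre_build_transformations cells → Spec_build_transformations cells (build_transformations cells)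

-- ===== LEMMAS AND PROOFS =====

-- §1 the lexicographic order and insertion sort

theorem pvLexLt_asymm {a b : Int × Int × Int} (h : pvLexLt a b = true) : pvLexLt b a = false := by
  obtain ⟨a1, a2, a3⟩ := a; obtain ⟨b1, b2, b3⟩ := b
  simp only [pvLexLt] at *; simp_all; omega

theorem pvLexLt_antisymm {a b : Int × Int × Int} (h1 : pvLexLt a b = false)
    (h2 : pvLexLt b a = false) : a = b := by
  obtain ⟨a1, a2, a3⟩ := a; obtain ⟨b1, b2, b3⟩ := b
  simp only [pvLexLt] at *; simp_all [Prod.ext_iff]; omega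

theorem pvLexLt_lt_of_le {x y z : Int × Int × Int} (h1 : pvLexLt x y = true)
    (h2 : pvLexLt z y = false) : pvLexLt z x = false := by
  obtain ⟨a1, a2, a3⟩ := x; obtain ⟨b1, b2, b3⟩ := y; obtain ⟨c1, c2, c3⟩ := z
  simp only [pvLexLt] at *; simp_all; omega

theorem insertBy_perm (x : Int × Int × Int) (ys : List (Int × Int × Int)) :
    (PySem.List.insertBy pvLexLt x ys).Perm (x :: ys) := by
  induction ys with
  | nil => simp [PySem.List.insertBy]
  | cons y ys ih =>
    rw [PySem.List.insertBy]
    split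
    · exact List.Perm.refl _
    · exact ((ih.cons y).trans (List.Perm.swap x y ys))

theorem insertBy_pairwise (x : Int × Int × Int) (ys : List (Int × Int × Int))
    (h : ys.Pairwise (fun a b => pvLexLt b a = false)) :
    (PySem.List.insertBy pvLexLt x ys).Pairwise (fun a b => pvLexLt b a = false) := by
  induction ys with
  | nil => simp [PySem.List.insertBy]
  | cons y ys ih =>
    obtain ⟨hy, hys⟩ := List.pairwise_cons.1 h
    rw [PySem.List.insertBy]
    split
    · rename_i hlt
      refine List.Pairwise.cons ?_ (List.Pairwise.cons hy hys)
      intro z hz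
      rcases List.mem_cons.1 hz with rfl | hz
      · exact pvLexLt_asymm hlt
      · exact pvLexLt_lt_of_le hlt (hy z hz)
    · rename_i hnlt
      refine List.Pairwise.cons ?_ (ih hys)
      intro z hz
      rcases (PySem.List.mem_insertBy pvLexLt x z ys).1 hz with rfl | hz
      · simpa using hnlt
      · exact hy z hz

theorem foldl_insert_perm (xs : List (Int × Int × Int)) :
    ∀ acc, (xs.foldl (fun a x => PySem.List.insertBy pvLexLt x a) acc).Perm (acc ++ xs) := by
  induction xs with
  | nil => intro acc; simp
  | cons x xs ih =>
    intro acc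
    refine (ih _).trans ?_
    refine ((insertBy_perm x acc).append_right xs).trans ?_
    simpa using (List.perm_middle (a := x) (l₁ := acc) (l₂ := xs)).symm

theorem pvSort_perm (xs : List (Int × Int × Int)) : (pvSort xs).Perm xs := by
  simpa using foldl_insert_perm xs []

theorem pvSort_pairwise (xs : List (Int × Int × Int)) :
    (pvSort xs).Pairwise (fun a b => pvLexLt b a = false) := by
  have : ∀ acc, acc.Pairwise (fun a b => pvLexLt b a = false) →
      (xs.foldl (fun a x => PySem.List.insertBy pvLexLt x a) acc).Pairwise
        (fun a b => pvLexLt b a = false) := by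
    induction xs with
    | nil => intro acc h; simpa using h
    | cons x xs ih => intro acc h; exact ih _ (insertBy_pairwise x acc h)
  simpa [pvSort] using this [] (by simp)

theorem pvSort_congr {xs ys : List (Int × Int × Int)} (h : xs.Perm ys) : pvSort xs = pvSort ys := by
  refine List.Perm.eq_of_pairwise (fun a b _ _ h1 h2 => pvLexLt_antisymm h2 h1)
    (pvSort_pairwise xs) (pvSort_pairwise ys) ?_
  exact (pvSort_perm xs).trans (h.trans (pvSort_perm ys).symm)

-- §2 normalisation and the canonical form
-- translation of a cell
def pvTr (v c : Int × Int × Int) : Int × Int × Int := (c.1 + v.1, c.2.1 + v.2.1, c.2.2 + v.2.2)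

theorem pvMinD_spec {xs : List Int} (h : xs ≠ []) :
    pvMinD xs ∈ xs ∧ ∀ y ∈ xs, pvMinD xs ≤ y := by
  cases hm : PySem.List.min? xs (fun x => x) with
  | none => exact absurd ((PySem.List.min?_eq_none_iff xs _).1 hm) h
  | some m =>
    constructor
    · simpa [pvMinD, hm] using PySem.List.min?_mem hm
    · intro y hy
      simpa [pvMinD, hm] using PySem.List.min?_isMin hm y hy

theorem pvMinD_unique {xs : List Int} {m : Int} (h : xs ≠ []) (hm : m ∈ xs)
    (hle : ∀ y ∈ xs, m ≤ y) : pvMinD xs = m :=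
  le_antisymm ((pvMinD_spec h).2 m hm) (hle _ (pvMinD_spec h).1)

theorem pvMinD_perm {xs ys : List Int} (h : xs.Perm ys) : pvMinD xs = pvMinD ys := by
  rcases eq_or_ne xs [] with rfl | hne
  · rw [h.symm.eq_nil]
  · have hyne : ys ≠ [] := fun hy => hne (List.Perm.eq_nil (by rw [← hy]; exact h))
    have hs := pvMinD_spec hne
    exact (pvMinD_unique hyne (h.mem_iff.1 hs.1) (fun y hy => hs.2 y (h.mem_iff.2 hy))).symm

theorem pvMinD_shift {xs : List Int} (a : Int) (h : xs ≠ []) :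
    pvMinD (xs.map (fun x => x + a)) = pvMinD xs + a := by
  have hs := pvMinD_spec h
  refine pvMinD_unique (by simpa using h) (List.mem_map.2 ⟨pvMinD xs, hs.1, rfl⟩) ?_
  intro y hy
  rcases List.mem_map.1 hy with ⟨z, hz, rfl⟩
  have := hs.2 z hz; omega

theorem pvNormalize_as_tr (xs : List (Int × Int × Int)) :
    ∃ v, pvNormalize xs = xs.map (pvTr v) := by
  refine ⟨(-(pvMinD (xs.map (fun c => c.1))), -(pvMinD (xs.map (fun c => c.2.1))),
    -(pvMinD (xs.map (fun c => c.2.2)))), ?_⟩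
  simp only [pvNormalize]
  exact List.map_congr_left fun c _ => by simp [pvTr, sub_eq_add_neg]

theorem pvNormalize_perm {xs ys : List (Int × Int × Int)} (h : xs.Perm ys) :
    (pvNormalize xs).Perm (pvNormalize ys) := by
  simp only [pvNormalize]
  rw [pvMinD_perm (h.map (fun c => c.1)), pvMinD_perm (h.map (fun c => c.2.1)),
    pvMinD_perm (h.map (fun c => c.2.2))]
  exact h.map _

theorem pvNormalize_tr (v : Int × Int × Int) (xs : List (Int × Int × Int)) :
    pvNormalize (xs.map (pvTr v)) = pvNormalize xs := by
  rcases eq_or_ne xs [] with rfl | hne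
  · rfl
  · have hne1 : xs.map (fun c : Int × Int × Int => c.1) ≠ [] := by simpa using hne
    have hne2 : xs.map (fun c : Int × Int × Int => c.2.1) ≠ [] := by simpa using hne
    have hne3 : xs.map (fun c : Int × Int × Int => c.2.2) ≠ [] := by simpa using hne
    have h1 : xs.map ((fun c : Int × Int × Int => c.1) ∘ pvTr v)
        = (xs.map (fun c => c.1)).map (fun x => x + v.1) := by
      simp [List.map_map, Function.comp, pvTr, Int.add_comm]
    have h2 : xs.map ((fun c : Int × Int × Int => c.2.1) ∘ pvTr v)
        = (xs.map (fun c => c.2.1)).map (fun x => x + v.2.1) := by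
      simp [List.map_map, Function.comp, pvTr, Int.add_comm]
    have h3 : xs.map ((fun c : Int × Int × Int => c.2.2) ∘ pvTr v)
        = (xs.map (fun c => c.2.2)).map (fun x => x + v.2.2) := by
      simp [List.map_map, Function.comp, pvTr, Int.add_comm]
    simp only [pvNormalize, List.map_map]
    rw [h1, h2, h3, pvMinD_shift _ hne1, pvMinD_shift _ hne2, pvMinD_shift _ hne3]
    exact List.map_congr_left fun c _ => by simp [pvTr, Function.comp]

theorem pvCanon_perm {xs ys : List (Int × Int × Int)} (h : xs.Perm ys) : pvCanon xs = pvCanon ys :=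
  pvSort_congr (pvNormalize_perm h)

theorem pvCanon_tr (v : Int × Int × Int) (xs : List (Int × Int × Int)) :
    pvCanon (xs.map (pvTr v)) = pvCanon xs := by
  unfold pvCanon; rw [pvNormalize_tr]

theorem pvCanon_map_canon (f : Int × Int × Int → Int × Int × Int)
    (hf : ∀ v, ∃ w, ∀ c, f (pvTr v c) = pvTr w (f c)) (y : List (Int × Int × Int)) :
    pvCanon ((pvCanon y).map f) = pvCanon (y.map f) := by
  obtain ⟨v, hv⟩ := pvNormalize_as_tr y
  obtain ⟨w, hw⟩ := hf v
  have h1 : (pvCanon y).Perm (pvNormalize y) := pvSort_perm _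
  calc pvCanon ((pvCanon y).map f) = pvCanon ((pvNormalize y).map f) := pvCanon_perm (h1.map f)
    _ = pvCanon ((y.map (pvTr v)).map f) := by rw [hv]
    _ = pvCanon ((y.map f).map (pvTr w)) := by
        rw [List.map_map, List.map_map]
        exact pvCanon_perm (List.Perm.refl _) ▸ congrArg pvCanon
          (List.map_congr_left fun c _ => by simpa using hw c)
    _ = pvCanon (y.map f) := pvCanon_tr w _

theorem pvStepRot_canon (y : List (Int × Int × Int)) :
    pvStepRot (pvCanon y) = pvCanon (y.map pvRotXY) :=
  pvCanon_map_canon pvRotXY (fun v => ⟨(v.2.1, -v.1, v.2.2), fun c => by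
    obtain ⟨a, b, z⟩ := c; simp [pvRotXY, pvTr]; omega⟩) y

theorem pvStepRef_canon (y : List (Int × Int × Int)) :
    pvStepRef (pvCanon y) = pvCanon (y.map pvReflect) :=
  pvCanon_map_canon pvReflect (fun v => ⟨(-v.1, v.2.1, v.2.2), fun c => by
    obtain ⟨a, b, z⟩ := c; simp [pvReflect, pvTr]; omega⟩) y

-- §3 one seed of A's nested loops = one seed of B's straight-line fold
def pvInv (T : List (List (Int × Int × Int))) : Prop :=
  ∀ x ∈ T, pvStepRot x ∈ T ∧ pvStepRef x ∈ T

theorem pvChain_succ (f : Nat) (T : List (List (Int × Int × Int))) (x : List (Int × Int × Int)) :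
    pvChain (f + 1) T x = if x ∈ T then (T, x) else pvChain f (T ++ [x]) (pvStepRot x) := rfl

theorem pvSeedLoop_succ (f : Nat) (T : List (List (Int × Int × Int))) (x : List (Int × Int × Int)) :
    pvSeedLoop (f + 1) T x =
      if x ∈ T then T
      else pvSeedLoop f (pvChain (f + 1) T x).1 (pvStepRef (pvChain (f + 1) T x).2) := rfl

theorem pvAdd2_pos {res : List (List (Int × Int × Int))} {x : List (Int × Int × Int)}
    (h : x ∈ res) : pvAdd2 res x = res := if_pos h

theorem pvAdd2_neg {res : List (List (Int × Int × Int))} {x : List (Int × Int × Int)}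
    (h : x ∉ res) : pvAdd2 res x = res ++ [x] := if_neg h

theorem pvSeedB_eq (res : List (List (Int × Int × Int))) (c : List (Int × Int × Int)) :
    pvSeedB res c =
      pvAdd2 (pvAdd2 (pvAdd2 (pvAdd2
        (pvAdd2 (pvAdd2 (pvAdd2 (pvAdd2 res c) (pvStepRot c)) (pvStepRot (pvStepRot c)))
          (pvStepRot (pvStepRot (pvStepRot c))))
        (pvStepRef c)) (pvStepRot (pvStepRef c))) (pvStepRot (pvStepRot (pvStepRef c))))
        (pvStepRot (pvStepRot (pvStepRot (pvStepRef c)))) := by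
  simp [pvSeedB, pvOrbit4, List.range_succ]

theorem pvInv_append {T L : List (List (Int × Int × Int))} (hT : pvInv T)
    (hL : ∀ x ∈ L, pvStepRot x ∈ T ++ L ∧ pvStepRef x ∈ T ++ L) : pvInv (T ++ L) := by
  intro x hx
  rcases List.mem_append.1 hx with hx | hx
  · exact ⟨List.mem_append_left _ (hT x hx).1, List.mem_append_left _ (hT x hx).2⟩
  · exact hL x hx

set_option maxHeartbeats 1600000 in
theorem seed_eq (f : Nat) (hf : 10 ≤ f) (T : List (List (Int × Int × Int)))
    (c0 c1 c2 c3 d0 d1 d2 d3 : List (Int × Int × Int))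
    (hc1 : pvStepRot c0 = c1) (hc2 : pvStepRot c1 = c2) (hc3 : pvStepRot c2 = c3)
    (hc0 : pvStepRot c3 = c0)
    (hd1 : pvStepRot d0 = d1) (hd2 : pvStepRot d1 = d2) (hd3 : pvStepRot d2 = d3)
    (hd0 : pvStepRot d3 = d0)
    (hm0 : pvStepRef c0 = d0) (hm1 : pvStepRef c1 = d3) (hm2 : pvStepRef c2 = d2)
    (hm3 : pvStepRef c3 = d1)
    (hn0 : pvStepRef d0 = c0) (hn1 : pvStepRef d1 = c3) (hn2 : pvStepRef d2 = c2)
    (hn3 : pvStepRef d3 = c1)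
    (hInv : pvInv T) :
    pvSeedLoop f T c0 = pvSeedB T c0 ∧ pvInv (pvSeedB T c0) := by
  have hB : pvSeedB T c0 =
      pvAdd2 (pvAdd2 (pvAdd2 (pvAdd2 (pvAdd2 (pvAdd2 (pvAdd2 (pvAdd2 T c0) c1) c2) c3) d0) d1) d2) d3 := by
    rw [pvSeedB_eq, hc1, hc2, hc3, hm0, hd1, hd2, hd3]
  obtain ⟨k, rfl⟩ : ∃ k, f = k + 10 := ⟨f - 10, by omega⟩
  by_cases h0 : c0 ∈ T
  · -- the whole orbit is already present
    have e1 : c1 ∈ T := hc1 ▸ (hInv c0 h0).1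
    have e2 : c2 ∈ T := hc2 ▸ (hInv c1 e1).1
    have e3 : c3 ∈ T := hc3 ▸ (hInv c2 e2).1
    have f0 : d0 ∈ T := hm0 ▸ (hInv c0 h0).2
    have f1 : d1 ∈ T := hd1 ▸ (hInv d0 f0).1
    have f2 : d2 ∈ T := hd2 ▸ (hInv d1 f1).1
    have f3 : d3 ∈ T := hd3 ▸ (hInv d2 f2).1
    have hA : pvSeedLoop (k + 10) T c0 = T := by
      rw [show k + 10 = (k + 9) + 1 from rfl, pvSeedLoop_succ, if_pos h0]
    have b0 : pvAdd2 T c0 = T := pvAdd2_pos h0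
    have b1 : pvAdd2 T c1 = T := pvAdd2_pos e1
    have b2 : pvAdd2 T c2 = T := pvAdd2_pos e2
    have b3 : pvAdd2 T c3 = T := pvAdd2_pos e3
    have b4 : pvAdd2 T d0 = T := pvAdd2_pos f0
    have b5 : pvAdd2 T d1 = T := pvAdd2_pos f1
    have b6 : pvAdd2 T d2 = T := pvAdd2_pos f2
    have b7 : pvAdd2 T d3 = T := pvAdd2_pos f3
    have hBv : pvSeedB T c0 = T := by rw [hB, b0, b1, b2, b3, b4, b5, b6, b7]
    exact ⟨hA.trans hBv.symm, by rw [hBv]; exact hInv⟩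
  · have rotT : ∀ x, x ∈ T → pvStepRot x ∈ T := fun x hx => (hInv x hx).1
    have refT : ∀ x, x ∈ T → pvStepRef x ∈ T := fun x hx => (hInv x hx).2
    have nc1 : c1 ∉ T := fun h => h0 (hc0 ▸ rotT _ (hc3 ▸ rotT _ (hc2 ▸ rotT _ h)))
    have nc2 : c2 ∉ T := fun h => h0 (hc0 ▸ rotT _ (hc3 ▸ rotT _ h))
    have nc3 : c3 ∉ T := fun h => h0 (hc0 ▸ rotT _ h)
    have nd0 : d0 ∉ T := fun h => h0 (hn0 ▸ refT _ h)
    have nd1 : d1 ∉ T := fun h => h0 (hn0 ▸ refT _ (hd0 ▸ rotT _ (hd3 ▸ rotT _ (hd2 ▸ rotT _ h))))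
    have nd2 : d2 ∉ T := fun h => h0 (hn0 ▸ refT _ (hd0 ▸ rotT _ (hd3 ▸ rotT _ h)))
    have nd3 : d3 ∉ T := fun h => h0 (hn0 ▸ refT _ (hd0 ▸ rotT _ h))
    by_cases hp1 : c1 = c0
    · -- rotation period 1
      have hq2 : c2 = c0 := by rw [← hc2, hp1, hc1]; exact hp1
      have hq3 : c3 = c0 := by rw [← hc3, hq2, hc1]; exact hp1
      have hr1 : d1 = d0 := by rw [← hm3, hq3, hm0]
      have hr2 : d2 = d0 := by rw [← hd2, hr1, hd1]; exact hr1
      have hr3 : d3 = d0 := by rw [← hd3, hr2, hd1]; exact hr1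
      have m1 : c1 ∈ T ++ [c0] := by simp [hp1]
      have hch : pvChain ((k + 9) + 1) T c0 = (T ++ [c0], c1) := by
        rw [pvChain_succ, if_neg h0, hc1, show k + 9 = (k + 8) + 1 from rfl,
          pvChain_succ, if_pos m1]
      by_cases hq : d0 = c0
      · have m2 : d3 ∈ T ++ [c0] := by simp [hr3, hq]
        have hA : pvSeedLoop (k + 10) T c0 = T ++ [c0] := by
          rw [show k + 10 = (k + 9) + 1 from rfl, pvSeedLoop_succ, if_neg h0, hch, hm1,
            show k + 9 = (k + 8) + 1 from rfl, pvSeedLoop_succ, if_pos m2]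
        have b0 : pvAdd2 T c0 = T ++ [c0] := pvAdd2_neg h0
        have b1 : pvAdd2 (T ++ [c0]) c1 = T ++ [c0] := pvAdd2_pos (by simp [hp1])
        have b2 : pvAdd2 (T ++ [c0]) c2 = T ++ [c0] := pvAdd2_pos (by simp [hq2])
        have b3 : pvAdd2 (T ++ [c0]) c3 = T ++ [c0] := pvAdd2_pos (by simp [hq3])
        have b4 : pvAdd2 (T ++ [c0]) d0 = T ++ [c0] := pvAdd2_pos (by simp [hq])
        have b5 : pvAdd2 (T ++ [c0]) d1 = T ++ [c0] := pvAdd2_pos (by simp [hr1, hq])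
        have b6 : pvAdd2 (T ++ [c0]) d2 = T ++ [c0] := pvAdd2_pos (by simp [hr2, hq])
        have b7 : pvAdd2 (T ++ [c0]) d3 = T ++ [c0] := pvAdd2_pos (by simp [hr3, hq])
        have hBv : pvSeedB T c0 = T ++ [c0] := by rw [hB, b0, b1, b2, b3, b4, b5, b6, b7]
        have hI : pvInv (T ++ [c0]) := by
          apply pvInv_append hInv
          intro x hx
          rcases show x = c0 by simpa using hx with rfl
          exact ⟨by simp [hc1, hp1], by simp [hm0, hq]⟩
        exact ⟨hA.trans hBv.symm, by rw [hBv]; exact hI⟩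
      · have m2 : d3 ∉ T ++ [c0] := by simp [hr3, nd0, hq]
        have m3 : d1 ∈ (T ++ [c0]) ++ [d3] := by simp [hr1, hr3]
        have hch2 : pvChain ((k + 8) + 1) (T ++ [c0]) d3 = (T ++ [c0, d3], d1) := by
          rw [pvChain_succ, if_neg m2, hr3, hd1, show k + 8 = (k + 7) + 1 from rfl,
            pvChain_succ, if_pos (by simpa [hr3] using m3)]
          simp
        have m4 : c3 ∈ T ++ [c0, d3] := by simp [hq3]
        have hA : pvSeedLoop (k + 10) T c0 = T ++ [c0, d3] := by
          rw [show k + 10 = (k + 9) + 1 from rfl, pvSeedLoop_succ, if_neg h0, hch, hm1,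
            show k + 9 = (k + 8) + 1 from rfl, pvSeedLoop_succ, if_neg m2, hch2, hn1,
            show k + 8 = (k + 7) + 1 from rfl, pvSeedLoop_succ, if_pos m4]
        have b0 : pvAdd2 T c0 = T ++ [c0] := pvAdd2_neg h0
        have b1 : pvAdd2 (T ++ [c0]) c1 = T ++ [c0] := pvAdd2_pos (by simp [hp1])
        have b2 : pvAdd2 (T ++ [c0]) c2 = T ++ [c0] := pvAdd2_pos (by simp [hq2])
        have b3 : pvAdd2 (T ++ [c0]) c3 = T ++ [c0] := pvAdd2_pos (by simp [hq3])
        have b4 : pvAdd2 (T ++ [c0]) d0 = T ++ [c0, d0] := by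
          rw [pvAdd2_neg (by simp [nd0, hq])]; simp
        have b5 : pvAdd2 (T ++ [c0, d0]) d1 = T ++ [c0, d0] := pvAdd2_pos (by simp [hr1])
        have b6 : pvAdd2 (T ++ [c0, d0]) d2 = T ++ [c0, d0] := pvAdd2_pos (by simp [hr2])
        have b7 : pvAdd2 (T ++ [c0, d0]) d3 = T ++ [c0, d0] := pvAdd2_pos (by simp [hr3])
        have hBv : pvSeedB T c0 = T ++ [c0, d0] := by rw [hB, b0, b1, b2, b3, b4, b5, b6, b7]
        have hI : pvInv (T ++ [c0, d0]) := by
          apply pvInv_append hInv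
          intro x hx
          rcases show x = c0 ∨ x = d0 by simpa using hx with rfl | rfl
          · exact ⟨by simp [hc1, hp1], by simp [hm0]⟩
          · exact ⟨by simp [hd1, hr1], by simp [hn0]⟩
        refine ⟨hA.trans ?_, by rw [hBv]; exact hI⟩
        rw [hBv, hr3]
    · by_cases hp2 : c2 = c0
      · -- rotation period 2
        have hq3 : c3 = c1 := by rw [← hc3, hp2, hc1]
        have hr2 : d2 = d0 := by rw [← hm2, hp2, hm0]
        have hr3 : d3 = d1 := by rw [← hd3, hr2, hd1]
        have m1 : c1 ∉ T ++ [c0] := by simp [nc1, hp1]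
        have m2 : c2 ∈ (T ++ [c0]) ++ [c1] := by simp [hp2]
        have hch : pvChain ((k + 9) + 1) T c0 = (T ++ [c0, c1], c2) := by
          rw [pvChain_succ, if_neg h0, hc1, show k + 9 = (k + 8) + 1 from rfl,
            pvChain_succ, if_neg m1, hc2, show k + 8 = (k + 7) + 1 from rfl,
            pvChain_succ, if_pos m2]
          simp
        have b0 : pvAdd2 T c0 = T ++ [c0] := pvAdd2_neg h0
        have b1 : pvAdd2 (T ++ [c0]) c1 = T ++ [c0, c1] := by
          rw [pvAdd2_neg m1]; simp
        have b2 : pvAdd2 (T ++ [c0, c1]) c2 = T ++ [c0, c1] := pvAdd2_pos (by simp [hp2])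
        have b3 : pvAdd2 (T ++ [c0, c1]) c3 = T ++ [c0, c1] := pvAdd2_pos (by simp [hq3])
        by_cases hq : d0 = c0
        · have hd1c : d1 = c1 := by rw [← hd1, hq, hc1]
          have m3 : d0 ∈ T ++ [c0, c1] := by simp [hq]
          have hA : pvSeedLoop (k + 10) T c0 = T ++ [c0, c1] := by
            rw [show k + 10 = (k + 9) + 1 from rfl, pvSeedLoop_succ, if_neg h0, hch, hm2, hr2,
              show k + 9 = (k + 8) + 1 from rfl, pvSeedLoop_succ, if_pos m3]
          have b4 : pvAdd2 (T ++ [c0, c1]) d0 = T ++ [c0, c1] := pvAdd2_pos (by simp [hq])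
          have b5 : pvAdd2 (T ++ [c0, c1]) d1 = T ++ [c0, c1] := pvAdd2_pos (by simp [hd1c])
          have b6 : pvAdd2 (T ++ [c0, c1]) d2 = T ++ [c0, c1] := pvAdd2_pos (by simp [hr2, hq])
          have b7 : pvAdd2 (T ++ [c0, c1]) d3 = T ++ [c0, c1] := pvAdd2_pos (by simp [hr3, hd1c])
          have hBv : pvSeedB T c0 = T ++ [c0, c1] := by rw [hB, b0, b1, b2, b3, b4, b5, b6, b7]
          have hI : pvInv (T ++ [c0, c1]) := by
            apply pvInv_append hInv
            intro x hx
            rcases show x = c0 ∨ x = c1 by simpa using hx with rfl | rfl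
            · exact ⟨by simp [hc1], by simp [hm0, hq]⟩
            · exact ⟨by simp [hc2, hp2], by simp [hm1, hr3, hd1c]⟩
          exact ⟨hA.trans hBv.symm, by rw [hBv]; exact hI⟩
        · by_cases hq' : d0 = c1
          · have hd1c : d1 = c0 := by rw [← hd1, hq', hc2]; exact hp2
            have m3 : d0 ∈ T ++ [c0, c1] := by simp [hq']
            have hA : pvSeedLoop (k + 10) T c0 = T ++ [c0, c1] := by
              rw [show k + 10 = (k + 9) + 1 from rfl, pvSeedLoop_succ, if_neg h0, hch, hm2, hr2,
                show k + 9 = (k + 8) + 1 from rfl, pvSeedLoop_succ, if_pos m3]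
            have b4 : pvAdd2 (T ++ [c0, c1]) d0 = T ++ [c0, c1] := pvAdd2_pos (by simp [hq'])
            have b5 : pvAdd2 (T ++ [c0, c1]) d1 = T ++ [c0, c1] := pvAdd2_pos (by simp [hd1c])
            have b6 : pvAdd2 (T ++ [c0, c1]) d2 = T ++ [c0, c1] := pvAdd2_pos (by simp [hr2, hq'])
            have b7 : pvAdd2 (T ++ [c0, c1]) d3 = T ++ [c0, c1] := pvAdd2_pos (by simp [hr3, hd1c])
            have hBv : pvSeedB T c0 = T ++ [c0, c1] := by rw [hB, b0, b1, b2, b3, b4, b5, b6, b7]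
            have hI : pvInv (T ++ [c0, c1]) := by
              apply pvInv_append hInv
              intro x hx
              rcases show x = c0 ∨ x = c1 by simpa using hx with rfl | rfl
              · exact ⟨by simp [hc1], by simp [hm0, hq']⟩
              · exact ⟨by simp [hc2, hp2], by simp [hm1, hr3, hd1c]⟩
            exact ⟨hA.trans hBv.symm, by rw [hBv]; exact hI⟩
          · -- reflection produces a second 2-cycle
            have hd10 : d1 ≠ d0 := fun h => hp1 (by rw [← hq3, ← hn1, h, hn0])
            have nd1c0 : d1 ≠ c0 := fun h => hq' (by rw [← hq3, ← hn1, h, hm0])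
            have nd1c1 : d1 ≠ c1 := fun h => hq (by rw [← hp2, ← hc2, ← h, hd2, hr2])
            have m3 : d0 ∉ T ++ [c0, c1] := by simp [nd0, hq, hq']
            have m4 : d1 ∉ (T ++ [c0, c1]) ++ [d0] := by simp [nd1, nd1c0, nd1c1, hd10]
            have m5 : d2 ∈ ((T ++ [c0, c1]) ++ [d0]) ++ [d1] := by simp [hr2]
            have hch2 : pvChain ((k + 8) + 1) (T ++ [c0, c1]) d0 = (T ++ [c0, c1, d0, d1], d2) := by
              rw [pvChain_succ, if_neg m3, hd1, show k + 8 = (k + 7) + 1 from rfl,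
                pvChain_succ, if_neg m4, hd2, show k + 7 = (k + 6) + 1 from rfl,
                pvChain_succ, if_pos m5]
              simp
            have m6 : c2 ∈ T ++ [c0, c1, d0, d1] := by simp [hp2]
            have hA : pvSeedLoop (k + 10) T c0 = T ++ [c0, c1, d0, d1] := by
              rw [show k + 10 = (k + 9) + 1 from rfl, pvSeedLoop_succ, if_neg h0, hch, hm2, hr2,
                show k + 9 = (k + 8) + 1 from rfl, pvSeedLoop_succ, if_neg m3, hch2, hn2,
                show k + 8 = (k + 7) + 1 from rfl, pvSeedLoop_succ, if_pos m6]
            have b4 : pvAdd2 (T ++ [c0, c1]) d0 = T ++ [c0, c1, d0] := by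
              rw [pvAdd2_neg m3]; simp
            have b5 : pvAdd2 (T ++ [c0, c1, d0]) d1 = T ++ [c0, c1, d0, d1] := by
              rw [pvAdd2_neg (by simp [nd1, nd1c0, nd1c1, hd10])]; simp
            have b6 : pvAdd2 (T ++ [c0, c1, d0, d1]) d2 = T ++ [c0, c1, d0, d1] :=
              pvAdd2_pos (by simp [hr2])
            have b7 : pvAdd2 (T ++ [c0, c1, d0, d1]) d3 = T ++ [c0, c1, d0, d1] :=
              pvAdd2_pos (by simp [hr3])
            have hBv : pvSeedB T c0 = T ++ [c0, c1, d0, d1] := by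
              rw [hB, b0, b1, b2, b3, b4, b5, b6, b7]
            have hI : pvInv (T ++ [c0, c1, d0, d1]) := by
              apply pvInv_append hInv
              intro x hx
              rcases show x = c0 ∨ x = c1 ∨ x = d0 ∨ x = d1 by simpa using hx with rfl | rfl | rfl | rfl
              · exact ⟨by simp [hc1], by simp [hm0]⟩
              · exact ⟨by simp [hc2, hp2], by simp [hm1, hr3]⟩
              · exact ⟨by simp [hd1], by simp [hn0]⟩
              · exact ⟨by simp [hd2, hr2], by simp [hn1, hq3]⟩
            exact ⟨hA.trans hBv.symm, by rw [hBv]; exact hI⟩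
      · -- rotation period 4
        have g30 : c3 ≠ c0 := fun h => hp1 (by
          have e := congrArg pvStepRot h; rw [hc0, hc1] at e; exact e.symm)
        have g21 : c2 ≠ c1 := fun h => hp2 (by
          have e1 := congrArg pvStepRot h; rw [hc3, hc2] at e1
          have e2 := congrArg pvStepRot e1; rw [hc0, hc3] at e2
          exact (e2.trans e1).symm)
        have g31 : c3 ≠ c1 := fun h => hp2 (by
          have e := congrArg pvStepRot h; rw [hc0, hc2] at e; exact e.symm)
        have g32 : c3 ≠ c2 := fun h => g30 (by
          have e := congrArg pvStepRot h; rw [hc0, hc3] at e; exact e.symm)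
        have m1 : c1 ∉ T ++ [c0] := by simp [nc1, hp1]
        have m2 : c2 ∉ (T ++ [c0]) ++ [c1] := by simp [nc2, hp2, g21]
        have m3 : c3 ∉ ((T ++ [c0]) ++ [c1]) ++ [c2] := by simp [nc3, g30, g31, g32]
        have m4 : c0 ∈ (((T ++ [c0]) ++ [c1]) ++ [c2]) ++ [c3] := by simp
        have hch : pvChain ((k + 9) + 1) T c0 = (T ++ [c0, c1, c2, c3], c0) := by
          rw [pvChain_succ, if_neg h0, hc1, show k + 9 = (k + 8) + 1 from rfl,
            pvChain_succ, if_neg m1, hc2, show k + 8 = (k + 7) + 1 from rfl,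
            pvChain_succ, if_neg m2, hc3, show k + 7 = (k + 6) + 1 from rfl,
            pvChain_succ, if_neg m3, hc0, show k + 6 = (k + 5) + 1 from rfl,
            pvChain_succ, if_pos m4]
          simp
        have b0 : pvAdd2 T c0 = T ++ [c0] := pvAdd2_neg h0
        have b1 : pvAdd2 (T ++ [c0]) c1 = T ++ [c0, c1] := by rw [pvAdd2_neg m1]; simp
        have b2 : pvAdd2 (T ++ [c0, c1]) c2 = T ++ [c0, c1, c2] := by
          rw [pvAdd2_neg (by simp [nc2, hp2, g21])]; simp
        have b3 : pvAdd2 (T ++ [c0, c1, c2]) c3 = T ++ [c0, c1, c2, c3] := by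
          rw [pvAdd2_neg (by simp [nc3, g30, g31, g32])]; simp
        by_cases hq0 : d0 = c0
        · have dd1 : d1 = c1 := by rw [← hd1, hq0, hc1]
          have dd2 : d2 = c2 := by rw [← hd2, dd1, hc2]
          have dd3 : d3 = c3 := by rw [← hd3, dd2, hc3]
          have m5 : d0 ∈ T ++ [c0, c1, c2, c3] := by simp [hq0]
          have hA : pvSeedLoop (k + 10) T c0 = T ++ [c0, c1, c2, c3] := by
            rw [show k + 10 = (k + 9) + 1 from rfl, pvSeedLoop_succ, if_neg h0, hch, hm0,
              show k + 9 = (k + 8) + 1 from rfl, pvSeedLoop_succ, if_pos m5]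
          have b4 : pvAdd2 (T ++ [c0, c1, c2, c3]) d0 = T ++ [c0, c1, c2, c3] :=
            pvAdd2_pos (by simp [hq0])
          have b5 : pvAdd2 (T ++ [c0, c1, c2, c3]) d1 = T ++ [c0, c1, c2, c3] :=
            pvAdd2_pos (by simp [dd1])
          have b6 : pvAdd2 (T ++ [c0, c1, c2, c3]) d2 = T ++ [c0, c1, c2, c3] :=
            pvAdd2_pos (by simp [dd2])
          have b7 : pvAdd2 (T ++ [c0, c1, c2, c3]) d3 = T ++ [c0, c1, c2, c3] :=
            pvAdd2_pos (by simp [dd3])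
          have hBv : pvSeedB T c0 = T ++ [c0, c1, c2, c3] := by
            rw [hB, b0, b1, b2, b3, b4, b5, b6, b7]
          have hI : pvInv (T ++ [c0, c1, c2, c3]) := by
            apply pvInv_append hInv
            intro x hx
            rcases show x = c0 ∨ x = c1 ∨ x = c2 ∨ x = c3 by simpa using hx with rfl | rfl | rfl | rfl
            · exact ⟨by simp [hc1], by simp [hm0, hq0]⟩
            · exact ⟨by simp [hc2], by simp [hm1, dd3]⟩
            · exact ⟨by simp [hc3], by simp [hm2, dd2]⟩
            · exact ⟨by simp [hc0], by simp [hm3, dd1]⟩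
          exact ⟨hA.trans hBv.symm, by rw [hBv]; exact hI⟩
        · by_cases hq1 : d0 = c1
          · have dd1 : d1 = c2 := by rw [← hd1, hq1, hc2]
            have dd2 : d2 = c3 := by rw [← hd2, dd1, hc3]
            have dd3 : d3 = c0 := by rw [← hd3, dd2, hc0]
            have m5 : d0 ∈ T ++ [c0, c1, c2, c3] := by simp [hq1]
            have hA : pvSeedLoop (k + 10) T c0 = T ++ [c0, c1, c2, c3] := by
              rw [show k + 10 = (k + 9) + 1 from rfl, pvSeedLoop_succ, if_neg h0, hch, hm0,
                show k + 9 = (k + 8) + 1 from rfl, pvSeedLoop_succ, if_pos m5]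
            have b4 : pvAdd2 (T ++ [c0, c1, c2, c3]) d0 = T ++ [c0, c1, c2, c3] :=
              pvAdd2_pos (by simp [hq1])
            have b5 : pvAdd2 (T ++ [c0, c1, c2, c3]) d1 = T ++ [c0, c1, c2, c3] :=
              pvAdd2_pos (by simp [dd1])
            have b6 : pvAdd2 (T ++ [c0, c1, c2, c3]) d2 = T ++ [c0, c1, c2, c3] :=
              pvAdd2_pos (by simp [dd2])
            have b7 : pvAdd2 (T ++ [c0, c1, c2, c3]) d3 = T ++ [c0, c1, c2, c3] :=
              pvAdd2_pos (by simp [dd3])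
            have hBv : pvSeedB T c0 = T ++ [c0, c1, c2, c3] := by
              rw [hB, b0, b1, b2, b3, b4, b5, b6, b7]
            have hI : pvInv (T ++ [c0, c1, c2, c3]) := by
              apply pvInv_append hInv
              intro x hx
              rcases show x = c0 ∨ x = c1 ∨ x = c2 ∨ x = c3 by simpa using hx with rfl | rfl | rfl | rfl
              · exact ⟨by simp [hc1], by simp [hm0, hq1]⟩
              · exact ⟨by simp [hc2], by simp [hm1, dd3]⟩
              · exact ⟨by simp [hc3], by simp [hm2, dd2]⟩
              · exact ⟨by simp [hc0], by simp [hm3, dd1]⟩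
            exact ⟨hA.trans hBv.symm, by rw [hBv]; exact hI⟩
          · by_cases hq2d : d0 = c2
            · have dd1 : d1 = c3 := by rw [← hd1, hq2d, hc3]
              have dd2 : d2 = c0 := by rw [← hd2, dd1, hc0]
              have dd3 : d3 = c1 := by rw [← hd3, dd2, hc1]
              have m5 : d0 ∈ T ++ [c0, c1, c2, c3] := by simp [hq2d]
              have hA : pvSeedLoop (k + 10) T c0 = T ++ [c0, c1, c2, c3] := by
                rw [show k + 10 = (k + 9) + 1 from rfl, pvSeedLoop_succ, if_neg h0, hch, hm0,
                  show k + 9 = (k + 8) + 1 from rfl, pvSeedLoop_succ, if_pos m5]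
              have b4 : pvAdd2 (T ++ [c0, c1, c2, c3]) d0 = T ++ [c0, c1, c2, c3] :=
                pvAdd2_pos (by simp [hq2d])
              have b5 : pvAdd2 (T ++ [c0, c1, c2, c3]) d1 = T ++ [c0, c1, c2, c3] :=
                pvAdd2_pos (by simp [dd1])
              have b6 : pvAdd2 (T ++ [c0, c1, c2, c3]) d2 = T ++ [c0, c1, c2, c3] :=
                pvAdd2_pos (by simp [dd2])
              have b7 : pvAdd2 (T ++ [c0, c1, c2, c3]) d3 = T ++ [c0, c1, c2, c3] :=
                pvAdd2_pos (by simp [dd3])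
              have hBv : pvSeedB T c0 = T ++ [c0, c1, c2, c3] := by
                rw [hB, b0, b1, b2, b3, b4, b5, b6, b7]
              have hI : pvInv (T ++ [c0, c1, c2, c3]) := by
                apply pvInv_append hInv
                intro x hx
                rcases show x = c0 ∨ x = c1 ∨ x = c2 ∨ x = c3 by simpa using hx with rfl | rfl | rfl | rfl
                · exact ⟨by simp [hc1], by simp [hm0, hq2d]⟩
                · exact ⟨by simp [hc2], by simp [hm1, dd3]⟩
                · exact ⟨by simp [hc3], by simp [hm2, dd2]⟩
                · exact ⟨by simp [hc0], by simp [hm3, dd1]⟩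
              exact ⟨hA.trans hBv.symm, by rw [hBv]; exact hI⟩
            · by_cases hq3d : d0 = c3
              · have dd1 : d1 = c0 := by rw [← hd1, hq3d, hc0]
                have dd2 : d2 = c1 := by rw [← hd2, dd1, hc1]
                have dd3 : d3 = c2 := by rw [← hd3, dd2, hc2]
                have m5 : d0 ∈ T ++ [c0, c1, c2, c3] := by simp [hq3d]
                have hA : pvSeedLoop (k + 10) T c0 = T ++ [c0, c1, c2, c3] := by
                  rw [show k + 10 = (k + 9) + 1 from rfl, pvSeedLoop_succ, if_neg h0, hch, hm0,
                    show k + 9 = (k + 8) + 1 from rfl, pvSeedLoop_succ, if_pos m5]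
                have b4 : pvAdd2 (T ++ [c0, c1, c2, c3]) d0 = T ++ [c0, c1, c2, c3] :=
                  pvAdd2_pos (by simp [hq3d])
                have b5 : pvAdd2 (T ++ [c0, c1, c2, c3]) d1 = T ++ [c0, c1, c2, c3] :=
                  pvAdd2_pos (by simp [dd1])
                have b6 : pvAdd2 (T ++ [c0, c1, c2, c3]) d2 = T ++ [c0, c1, c2, c3] :=
                  pvAdd2_pos (by simp [dd2])
                have b7 : pvAdd2 (T ++ [c0, c1, c2, c3]) d3 = T ++ [c0, c1, c2, c3] :=
                  pvAdd2_pos (by simp [dd3])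
                have hBv : pvSeedB T c0 = T ++ [c0, c1, c2, c3] := by
                  rw [hB, b0, b1, b2, b3, b4, b5, b6, b7]
                have hI : pvInv (T ++ [c0, c1, c2, c3]) := by
                  apply pvInv_append hInv
                  intro x hx
                  rcases show x = c0 ∨ x = c1 ∨ x = c2 ∨ x = c3 by simpa using hx with rfl | rfl | rfl | rfl
                  · exact ⟨by simp [hc1], by simp [hm0, hq3d]⟩
                  · exact ⟨by simp [hc2], by simp [hm1, dd3]⟩
                  · exact ⟨by simp [hc3], by simp [hm2, dd2]⟩
                  · exact ⟨by simp [hc0], by simp [hm3, dd1]⟩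
                exact ⟨hA.trans hBv.symm, by rw [hBv]; exact hI⟩
              · -- two disjoint 4-cycles
                have e10 : d1 ≠ d0 := fun h => g30 (by
                  have e := congrArg pvStepRef h; rw [hn1, hn0] at e; exact e)
                have e20 : d2 ≠ d0 := fun h => hp2 (by
                  have e := congrArg pvStepRef h; rw [hn2, hn0] at e; exact e)
                have e30 : d3 ≠ d0 := fun h => hp1 (by
                  have e := congrArg pvStepRef h; rw [hn3, hn0] at e; exact e)
                have e21 : d2 ≠ d1 := fun h => g32 (by
                  have e := congrArg pvStepRef h; rw [hn2, hn1] at e; exact e.symm)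
                have e31 : d3 ≠ d1 := fun h => g31 (by
                  have e := congrArg pvStepRef h; rw [hn3, hn1] at e; exact e.symm)
                have e32 : d3 ≠ d2 := fun h => g21 (by
                  have e := congrArg pvStepRef h; rw [hn3, hn2] at e; exact e.symm)
                have k10 : d1 ≠ c0 := fun h => hq3d (by
                  have e1 := congrArg pvStepRot h; rw [hd2, hc1] at e1
                  have e2 := congrArg pvStepRot e1; rw [hd3, hc2] at e2
                  have e3 := congrArg pvStepRot e2; rw [hd0, hc3] at e3; exact e3)
                have k11 : d1 ≠ c1 := fun h => hq0 (by
                  have e1 := congrArg pvStepRot h; rw [hd2, hc2] at e1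
                  have e2 := congrArg pvStepRot e1; rw [hd3, hc3] at e2
                  have e3 := congrArg pvStepRot e2; rw [hd0, hc0] at e3; exact e3)
                have k12 : d1 ≠ c2 := fun h => hq1 (by
                  have e1 := congrArg pvStepRot h; rw [hd2, hc3] at e1
                  have e2 := congrArg pvStepRot e1; rw [hd3, hc0] at e2
                  have e3 := congrArg pvStepRot e2; rw [hd0, hc1] at e3; exact e3)
                have k13 : d1 ≠ c3 := fun h => hq2d (by
                  have e1 := congrArg pvStepRot h; rw [hd2, hc0] at e1
                  have e2 := congrArg pvStepRot e1; rw [hd3, hc1] at e2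
                  have e3 := congrArg pvStepRot e2; rw [hd0, hc2] at e3; exact e3)
                have k20 : d2 ≠ c0 := fun h => hq2d (by
                  have e1 := congrArg pvStepRot h; rw [hd3, hc1] at e1
                  have e2 := congrArg pvStepRot e1; rw [hd0, hc2] at e2; exact e2)
                have k21 : d2 ≠ c1 := fun h => hq3d (by
                  have e1 := congrArg pvStepRot h; rw [hd3, hc2] at e1
                  have e2 := congrArg pvStepRot e1; rw [hd0, hc3] at e2; exact e2)
                have k22 : d2 ≠ c2 := fun h => hq0 (by
                  have e1 := congrArg pvStepRot h; rw [hd3, hc3] at e1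
                  have e2 := congrArg pvStepRot e1; rw [hd0, hc0] at e2; exact e2)
                have k23 : d2 ≠ c3 := fun h => hq1 (by
                  have e1 := congrArg pvStepRot h; rw [hd3, hc0] at e1
                  have e2 := congrArg pvStepRot e1; rw [hd0, hc1] at e2; exact e2)
                have k30 : d3 ≠ c0 := fun h => hq1 (by
                  have e1 := congrArg pvStepRot h; rw [hd0, hc1] at e1; exact e1)
                have k31 : d3 ≠ c1 := fun h => hq2d (by
                  have e1 := congrArg pvStepRot h; rw [hd0, hc2] at e1; exact e1)
                have k32 : d3 ≠ c2 := fun h => hq3d (by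
                  have e1 := congrArg pvStepRot h; rw [hd0, hc3] at e1; exact e1)
                have k33 : d3 ≠ c3 := fun h => hq0 (by
                  have e1 := congrArg pvStepRot h; rw [hd0, hc0] at e1; exact e1)
                have m5 : d0 ∉ T ++ [c0, c1, c2, c3] := by simp [nd0, hq0, hq1, hq2d, hq3d]
                have m6 : d1 ∉ (T ++ [c0, c1, c2, c3]) ++ [d0] := by
                  simp [nd1, k10, k11, k12, k13, e10]
                have m7 : d2 ∉ ((T ++ [c0, c1, c2, c3]) ++ [d0]) ++ [d1] := by
                  simp [nd2, k20, k21, k22, k23, e20, e21]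
                have m8 : d3 ∉ (((T ++ [c0, c1, c2, c3]) ++ [d0]) ++ [d1]) ++ [d2] := by
                  simp [nd3, k30, k31, k32, k33, e30, e31, e32]
                have m9 : d0 ∈ ((((T ++ [c0, c1, c2, c3]) ++ [d0]) ++ [d1]) ++ [d2]) ++ [d3] := by
                  simp
                have hch2 : pvChain ((k + 8) + 1) (T ++ [c0, c1, c2, c3]) d0 =
                    (T ++ [c0, c1, c2, c3, d0, d1, d2, d3], d0) := by
                  rw [pvChain_succ, if_neg m5, hd1, show k + 8 = (k + 7) + 1 from rfl,
                    pvChain_succ, if_neg m6, hd2, show k + 7 = (k + 6) + 1 from rfl,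
                    pvChain_succ, if_neg m7, hd3, show k + 6 = (k + 5) + 1 from rfl,
                    pvChain_succ, if_neg m8, hd0, show k + 5 = (k + 4) + 1 from rfl,
                    pvChain_succ, if_pos m9]
                  simp
                have m10 : c0 ∈ T ++ [c0, c1, c2, c3, d0, d1, d2, d3] := by simp
                have hA : pvSeedLoop (k + 10) T c0 = T ++ [c0, c1, c2, c3, d0, d1, d2, d3] := by
                  rw [show k + 10 = (k + 9) + 1 from rfl, pvSeedLoop_succ, if_neg h0, hch, hm0,
                    show k + 9 = (k + 8) + 1 from rfl, pvSeedLoop_succ, if_neg m5, hch2, hn0,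
                    show k + 8 = (k + 7) + 1 from rfl, pvSeedLoop_succ, if_pos m10]
                have b4 : pvAdd2 (T ++ [c0, c1, c2, c3]) d0 = T ++ [c0, c1, c2, c3, d0] := by
                  rw [pvAdd2_neg m5]; simp
                have b5 : pvAdd2 (T ++ [c0, c1, c2, c3, d0]) d1 = T ++ [c0, c1, c2, c3, d0, d1] := by
                  rw [pvAdd2_neg (by simp [nd1, k10, k11, k12, k13, e10])]; simp
                have b6 : pvAdd2 (T ++ [c0, c1, c2, c3, d0, d1]) d2 =
                    T ++ [c0, c1, c2, c3, d0, d1, d2] := by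
                  rw [pvAdd2_neg (by simp [nd2, k20, k21, k22, k23, e20, e21])]; simp
                have b7 : pvAdd2 (T ++ [c0, c1, c2, c3, d0, d1, d2]) d3 =
                    T ++ [c0, c1, c2, c3, d0, d1, d2, d3] := by
                  rw [pvAdd2_neg (by simp [nd3, k30, k31, k32, k33, e30, e31, e32])]; simp
                have hBv : pvSeedB T c0 = T ++ [c0, c1, c2, c3, d0, d1, d2, d3] := by
                  rw [hB, b0, b1, b2, b3, b4, b5, b6, b7]
                have hI : pvInv (T ++ [c0, c1, c2, c3, d0, d1, d2, d3]) := by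
                  apply pvInv_append hInv
                  intro x hx
                  rcases show x = c0 ∨ x = c1 ∨ x = c2 ∨ x = c3 ∨ x = d0 ∨ x = d1 ∨ x = d2 ∨ x = d3
                    by simpa using hx with rfl | rfl | rfl | rfl | rfl | rfl | rfl | rfl
                  · exact ⟨by simp [hc1], by simp [hm0]⟩
                  · exact ⟨by simp [hc2], by simp [hm1]⟩
                  · exact ⟨by simp [hc3], by simp [hm2]⟩
                  · exact ⟨by simp [hc0], by simp [hm3]⟩
                  · exact ⟨by simp [hd1], by simp [hn0]⟩
                  · exact ⟨by simp [hd2], by simp [hn1]⟩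
                  · exact ⟨by simp [hd3], by simp [hn2]⟩
                  · exact ⟨by simp [hd0], by simp [hn3]⟩
                exact ⟨hA.trans hBv.symm, by rw [hBv]; exact hI⟩

-- §4 the eight orbit elements of a canonical seed satisfy the dihedral tables
set_option maxHeartbeats 1600000 in
theorem seed_tables (T : List (List (Int × Int × Int))) (y : List (Int × Int × Int))
    (hInv : pvInv T) :
    pvSeedLoop 100 T (pvCanon y) = pvSeedB T (pvCanon y) ∧ pvInv (pvSeedB T (pvCanon y)) := by
  set c0 := pvCanon y with hc0def
  set c1 := pvStepRot c0 with hc1def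
  set c2 := pvStepRot c1 with hc2def
  set c3 := pvStepRot c2 with hc3def
  set d0 := pvStepRef c0 with hd0def
  set d1 := pvStepRot d0 with hd1def
  set d2 := pvStepRot d1 with hd2def
  set d3 := pvStepRot d2 with hd3def
  have E1 : c1 = pvCanon (y.map pvRotXY) := by rw [hc1def, hc0def, pvStepRot_canon]
  have E2 : c2 = pvCanon ((y.map pvRotXY).map pvRotXY) := by rw [hc2def, E1, pvStepRot_canon]
  have E3 : c3 = pvCanon (((y.map pvRotXY).map pvRotXY).map pvRotXY) := by
    rw [hc3def, E2, pvStepRot_canon]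
  have F0 : d0 = pvCanon (y.map pvReflect) := by rw [hd0def, hc0def, pvStepRef_canon]
  have F1 : d1 = pvCanon ((y.map pvReflect).map pvRotXY) := by rw [hd1def, F0, pvStepRot_canon]
  have F2 : d2 = pvCanon (((y.map pvReflect).map pvRotXY).map pvRotXY) := by
    rw [hd2def, F1, pvStepRot_canon]
  have F3 : d3 = pvCanon ((((y.map pvReflect).map pvRotXY).map pvRotXY).map pvRotXY) := by
    rw [hd3def, F2, pvStepRot_canon]
  have hc0 : pvStepRot c3 = c0 := by
    rw [E3, pvStepRot_canon, hc0def]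
    simp only [List.map_map]
    exact congrArg pvCanon ((List.map_congr_left fun c _ => by
      obtain ⟨a, b, z⟩ := c; simp [pvRotXY, Function.comp]).trans (List.map_id y))
  have hd0 : pvStepRot d3 = d0 := by
    rw [F3, pvStepRot_canon, F0]
    simp only [List.map_map]
    exact congrArg pvCanon (List.map_congr_left fun c _ => by
      obtain ⟨a, b, z⟩ := c; simp [pvRotXY, pvReflect, Function.comp])
  have hm1 : pvStepRef c1 = d3 := by
    rw [E1, pvStepRef_canon, F3]
    simp only [List.map_map]
    exact congrArg pvCanon (List.map_congr_left fun c _ => by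
      obtain ⟨a, b, z⟩ := c; simp [pvRotXY, pvReflect, Function.comp])
  have hm2 : pvStepRef c2 = d2 := by
    rw [E2, pvStepRef_canon, F2]
    simp only [List.map_map]
    exact congrArg pvCanon (List.map_congr_left fun c _ => by
      obtain ⟨a, b, z⟩ := c; simp [pvRotXY, pvReflect, Function.comp])
  have hm3 : pvStepRef c3 = d1 := by
    rw [E3, pvStepRef_canon, F1]
    simp only [List.map_map]
    exact congrArg pvCanon (List.map_congr_left fun c _ => by
      obtain ⟨a, b, z⟩ := c; simp [pvRotXY, pvReflect, Function.comp])
  have hn0 : pvStepRef d0 = c0 := by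
    rw [F0, pvStepRef_canon, hc0def]
    simp only [List.map_map]
    exact congrArg pvCanon ((List.map_congr_left fun c _ => by
      obtain ⟨a, b, z⟩ := c; simp [pvReflect, Function.comp]).trans (List.map_id y))
  have hn1 : pvStepRef d1 = c3 := by
    rw [F1, pvStepRef_canon, E3]
    simp only [List.map_map]
    exact congrArg pvCanon (List.map_congr_left fun c _ => by
      obtain ⟨a, b, z⟩ := c; simp [pvRotXY, pvReflect, Function.comp])
  have hn2 : pvStepRef d2 = c2 := by
    rw [F2, pvStepRef_canon, E2]
    simp only [List.map_map]
    exact congrArg pvCanon (List.map_congr_left fun c _ => by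
      obtain ⟨a, b, z⟩ := c; simp [pvRotXY, pvReflect, Function.comp])
  have hn3 : pvStepRef d3 = c1 := by
    rw [F3, pvStepRef_canon, E1]
    simp only [List.map_map]
    exact congrArg pvCanon (List.map_congr_left fun c _ => by
      obtain ⟨a, b, z⟩ := c; simp [pvRotXY, pvReflect, Function.comp])
  exact seed_eq 100 (by norm_num) T c0 c1 c2 c3 d0 d1 d2 d3 hc1def.symm hc2def.symm hc3def.symm
    hc0 hd1def.symm hd2def.symm hd3def.symm hd0 hd0def.symm hm1 hm2 hm3 hn0 hn1 hn2 hn3 hInv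

-- §5 the seed folds agree, B's fold is duplicate-free, and the final set() is the identity
set_option maxHeartbeats 1600000 in
theorem fold_eq (ss : List (List (Int × Int × Int))) :
    ∀ T, pvInv T →
      ss.foldl (fun T nc => pvSeedLoop 100 T (pvCanon nc)) T =
        ss.foldl (fun r s => pvSeedB r (pvCanon s)) T ∧
      pvInv (ss.foldl (fun r s => pvSeedB r (pvCanon s)) T) := by
  induction ss with
  | nil => exact fun T hT => ⟨rfl, hT⟩
  | cons y ss ih =>
    intro T hT
    obtain ⟨h1, h2⟩ := seed_tables T y hT
    obtain ⟨h3, h4⟩ := ih (pvSeedB T (pvCanon y)) h2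
    exact ⟨by simp only [List.foldl_cons, h1, h3], h4⟩

theorem nodup_pvAdd2 {res : List (List (Int × Int × Int))} {x : List (Int × Int × Int)}
    (h : res.Nodup) : (pvAdd2 res x).Nodup := by
  unfold pvAdd2
  split
  · exact h
  · rename_i hm
    simp [List.nodup_append, h]
    exact fun a ha e => hm (e ▸ ha)

theorem nodup_pvSeedB {res : List (List (Int × Int × Int))} (c : List (Int × Int × Int))
    (h : res.Nodup) : (pvSeedB res c).Nodup := by
  rw [pvSeedB_eq]
  exact nodup_pvAdd2 (nodup_pvAdd2 (nodup_pvAdd2 (nodup_pvAdd2 (nodup_pvAdd2 (nodup_pvAdd2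
    (nodup_pvAdd2 (nodup_pvAdd2 h)))))))

theorem nodup_foldB (ss : List (List (Int × Int × Int))) :
    ∀ T, T.Nodup → (ss.foldl (fun r s => pvSeedB r (pvCanon s)) T).Nodup := by
  induction ss with
  | nil => exact fun T h => h
  | cons y ss ih => exact fun T h => ih _ (nodup_pvSeedB _ h)

theorem ofList_eq_self {xs : List (List (Int × Int × Int))} (h : xs.Nodup) :
    PySem.Set.ofList xs = xs := by
  have aux : ∀ (ys acc : List (List (Int × Int × Int))), (∀ x ∈ ys, x ∉ acc) → ys.Nodup →
      List.foldl PySem.Set.add acc ys = acc ++ ys := by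
    intro ys
    induction ys with
    | nil => intro acc _ _; simp
    | cons y ys ih =>
      intro acc hacc hnd
      have hy : PySem.Set.contains acc y = false := by
        simp only [PySem.Set.contains, List.contains_eq_mem, decide_eq_false_iff_not]
        exact hacc y (by simp)
      simp only [List.foldl_cons, PySem.Set.add, hy, Bool.false_eq_true, if_false]
      rw [ih (acc ++ [y]) ?_ (List.nodup_cons.1 hnd).2]
      · simp
      · intro x hx
        simp only [List.mem_append, List.mem_singleton]
        rintro (hx' | rfl)
        · exact hacc x (by simp [hx]) hx'
        · exact (List.nodup_cons.1 hnd).1 hx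
  simpa using aux xs [] (by simp) h

-- ===== VERDICT (by name: the statement is the Claim_ definition above) =====
theorem build_transformations_spec : Claim_equal_build_transformations := by
  intro cells _ _
  unfold Spec_build_transformations
  obtain ⟨h1, _⟩ := fold_eq (cells :: pvRotZ (pvNormalize cells)) []
    (fun x hx => absurd hx (List.not_mem_nil))
  show PySem.Set.ofList
      ((cells :: pvRotZ (pvNormalize cells)).foldl (fun T nc => pvSeedLoop 100 T (pvCanon nc)) []) =
    (cells :: pvRotZ (pvNormalize cells)).foldl (fun result seed => pvSeedB result (pvCanon seed)) []
  rw [h1]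
  exact ofList_eq_self (nodup_foldB _ [] List.nodup_nil)
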